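-- pv_equiv track=rewrite | github.com/PlayfulProcess/recursive.eco-schemas | scripts/build_prose_edda.py | find_sections
-- ===== SOURCE A (Python) =====
-- def find_sections(lines):
--     """Find the major sections of the text."""
--     sections = {}
--
--     # Find Foreword
--     for i, line in enumerate(lines):
--         if line.strip() == "FOREWORD.":
--             sections['foreword_start'] = i
--             break
--
--     # Find Fooling of Gylfe (the actual narrative, not TOC)
--     gylfe_starts = []
--     for i, line in enumerate(lines):
--         if line.strip() == "THE FOOLING OF GYLFE.":
--             gylfe_starts.append(i)
--
--     # The first occurrence in the TOC area, the second is the actual narrative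
--     # We look for CHAPTER I right after THE FOOLING OF GYLFE
--     for gs in gylfe_starts:
--         # Check if there's a CHAPTER I within 10 lines
--         for j in range(gs + 1, min(gs + 10, len(lines))):
--             if lines[j].strip() == "CHAPTER I.":
--                 # Check if this is the narrative (has actual paragraph text nearby)
--                 for k in range(j + 1, min(j + 10, len(lines))):
--                     if len(lines[k].strip()) > 50:
--                         sections['gylfe_start'] = gs
--                         break
--                 if 'gylfe_start' in sections:
--                     break
--         if 'gylfe_start' in sections:
--             break
--
--     # Find Afterword to Gylfe
--     for i, line in enumerate(lines):
--         if line.strip() == "AFTERWORD" and i > sections.get('gylfe_start', 0):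
--             # Check next line for "TO THE FOOLING OF GYLFE"
--             for j in range(i + 1, min(i + 3, len(lines))):
--                 if "FOOLING OF GYLFE" in lines[j]:
--                     sections['gylfe_afterword_start'] = i
--                     break
--             if 'gylfe_afterword_start' in sections:
--                 break
--
--     # Find Brage's Talk
--     for i, line in enumerate(lines):
--         stripped = line.strip().replace('\u2019', "'")
--         if stripped == "BRAGE'S TALK.":
--             # Make sure it's the narrative one (has CHAPTER I nearby)
--             for j in range(i + 1, min(i + 10, len(lines))):
--                 if lines[j].strip() == "CHAPTER I.":
--                     for k in range(j + 1, min(j + 10, len(lines))):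
--                         if len(lines[k].strip()) > 50:
--                             sections['brage_start'] = i
--                             break
--                     break
--             if 'brage_start' in sections:
--                 break
--
--     # Find Afterword to Brage's Talk
--     for i, line in enumerate(lines):
--         if line.strip() == "AFTERWORD" and i > sections.get('brage_start', 0):
--             for j in range(i + 1, min(i + 3, len(lines))):
--                 # Handle both ASCII apostrophe and Unicode right single quotation mark
--                 line_normalized = lines[j].replace('\u2019', "'")
--                 if "BRAGE'S TALK" in line_normalized.upper():
--                     sections['brage_afterword_start'] = i
--                     break
--             if 'brage_afterword_start' in sections:
--                 break
--
--     # Find NOTES section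
--     for i, line in enumerate(lines):
--         if line.strip() == "NOTES." and i > sections.get('brage_afterword_start', 0):
--             sections['notes_start'] = i
--             break
--
--     return sections
-- ===== SOURCE B (Python) =====
-- def find_sections(lines):
--     """Find the major sections of the text."""
--     # One classification pass: record the positions of every kind of trigger
--     # line, then resolve the sections purely from these position lists.
--     forewords, gylfes, chapters, longs = [], [], [], []
--     afterwords, foolings, brages, brage_refs, notes = [], [], [], [], []
--     for i, line in enumerate(lines):
--         s = line.strip()
--         if s == "FOREWORD.":
--             forewords.append(i)
--         if s == "THE FOOLING OF GYLFE.":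
--             gylfes.append(i)
--         if s == "CHAPTER I.":
--             chapters.append(i)
--         if len(s) > 50:
--             longs.append(i)
--         if s == "AFTERWORD":
--             afterwords.append(i)
--         if "FOOLING OF GYLFE" in line:
--             foolings.append(i)
--         if s.replace('\u2019', "'") == "BRAGE'S TALK.":
--             brages.append(i)
--         if "BRAGE'S TALK" in line.replace('\u2019', "'").upper():
--             brage_refs.append(i)
--         if s == "NOTES.":
--             notes.append(i)
--
--     def in_window(idxs, a, b):
--         return any(a <= x < b for x in idxs)
--
--     def first(idxs, pred):
--         return next((x for x in idxs if pred(x)), None)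
--
--     fw = forewords[0] if forewords else None
--     gy = first(gylfes, lambda g: any(
--         g < j < g + 10 and in_window(longs, j + 1, j + 10) for j in chapters))
--     ga = first(afterwords, lambda i: i > (gy or 0)
--                and in_window(foolings, i + 1, i + 3))
--     br = first(brages, lambda i: next(
--         (in_window(longs, j + 1, j + 10) for j in chapters if i < j < i + 10),
--         False))
--     ba = first(afterwords, lambda i: i > (br or 0)
--                and in_window(brage_refs, i + 1, i + 3))
--     no = first(notes, lambda i: i > (ba or 0))
--
--     sections = {}
--     for key, idx in (('foreword_start', fw), ('gylfe_start', gy),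
--                      ('gylfe_afterword_start', ga), ('brage_start', br),
--                      ('brage_afterword_start', ba), ('notes_start', no)):
--         if idx is not None:
--             sections[key] = idx
--     return sections
-- ===== Notes on version B (the rewrite author's own statement) =====
-- stated objective: alternative
-- what changed: Replaces A's seven stateful scans over the lines (each with nested look-ahead rescans of lines) by ONE classification pass that records the positions of every trigger kind into nine index lists, after which each section is resolved purely by searches over those small position lists (no further reads of lines).
import Mathlib
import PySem

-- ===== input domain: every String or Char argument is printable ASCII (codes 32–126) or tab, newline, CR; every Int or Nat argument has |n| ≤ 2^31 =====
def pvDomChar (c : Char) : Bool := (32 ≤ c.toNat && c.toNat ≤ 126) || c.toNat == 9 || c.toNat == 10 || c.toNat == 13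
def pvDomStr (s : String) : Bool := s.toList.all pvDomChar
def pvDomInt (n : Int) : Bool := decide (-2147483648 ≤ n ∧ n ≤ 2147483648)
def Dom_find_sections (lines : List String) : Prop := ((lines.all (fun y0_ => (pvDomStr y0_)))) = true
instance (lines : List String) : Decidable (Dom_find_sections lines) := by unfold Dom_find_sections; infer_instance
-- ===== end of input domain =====

-- B replaces A's seven stateful scans (each rescanning lines in look-ahead windows) by one
-- classification pass recording all trigger positions into index lists, then resolves the
-- sections from those lists alone; equal return values, proved for all inputs.

-- shared helper for PORT A: the index window range(a, min(b, len(lines))) (indices always in range)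
def pvWindow (n a b : Nat) : List Nat := List.range' a (min b n - a)

-- ===== PORT A =====
-- A's repeated inner loop shape `for j in …: if p(j): …; break` returning whether it fired
def pvAAny (p : Nat → Bool) : List Nat → Bool
  | [] => false
  | j :: js => if p j then true else pvAAny p js

-- gylfe inner j-loop: every "CHAPTER I." in the window is tried until one has a long paragraph
def pvAGylfeChap (lines : List String) : List Nat → Bool
  | [] => false
  | j :: js =>
    if PySem.Str.strip (lines.getD j "") == "CHAPTER I." then
      if pvAAny (fun k => 50 < PySem.Str.len (PySem.Str.strip (lines.getD k ""))) (pvWindow lines.length (j+1) (j+10)) then true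
      else pvAGylfeChap lines js
    else pvAGylfeChap lines js

-- brage inner j-loop: only the FIRST "CHAPTER I." in the window is tried (break after the k-loop)
def pvABrageChap (lines : List String) : List Nat → Bool
  | [] => false
  | j :: js =>
    if PySem.Str.strip (lines.getD j "") == "CHAPTER I." then
      pvAAny (fun k => 50 < PySem.Str.len (PySem.Str.strip (lines.getD k ""))) (pvWindow lines.length (j+1) (j+10))
    else pvABrageChap lines js

-- A's outer loop shape `for i, line in enumerate(lines): if c(i, line): …; break`
def pvAScan (c : Nat → String → Bool) : Nat → List String → Option Nat
  | _, [] => none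
  | i, l :: ls => if c i l then some i else pvAScan c (i+1) ls

-- the gylfe_starts.append loop
def pvACollect : Nat → List String → List Nat
  | _, [] => []
  | i, l :: ls =>
    if PySem.Str.strip l == "THE FOOLING OF GYLFE." then i :: pvACollect (i+1) ls
    else pvACollect (i+1) ls

-- the `for gs in gylfe_starts: … break` loop
def pvAGylfeLoop (lines : List String) : List Nat → Option Nat
  | [] => none
  | gs :: rest =>
    if pvAGylfeChap lines (pvWindow lines.length (gs+1) (gs+10)) then some gs
    else pvAGylfeLoop lines rest

-- `if found: sections[key] = i` after a scan
def pvACond (d : PySem.Dict String Int) (k : String) (o : Option Nat) : PySem.Dict String Int :=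
  match o with
  | some i => d.insert k (i : Int)
  | none => d

def find_sections (lines : List String) : List (String × Int) :=
  let n := lines.length
  let d0 : PySem.Dict String Int := PySem.Dict.empty
  let d1 := pvACond d0 "foreword_start" (pvAScan (fun _ l => PySem.Str.strip l == "FOREWORD.") 0 lines)
  let d2 := pvACond d1 "gylfe_start" (pvAGylfeLoop lines (pvACollect 0 lines))
  let d3 := pvACond d2 "gylfe_afterword_start" (pvAScan (fun i l =>
              PySem.Str.strip l == "AFTERWORD" && decide ((i : Int) > d2.getD "gylfe_start" 0) &&
              pvAAny (fun j => PySem.Str.isIn "FOOLING OF GYLFE" (lines.getD j "")) (pvWindow n (i+1) (i+3))) 0 lines)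
  let d4 := pvACond d3 "brage_start" (pvAScan (fun i l =>
              PySem.Str.replace (PySem.Str.strip l) "\u2019" "'" == "BRAGE'S TALK." &&
              pvABrageChap lines (pvWindow n (i+1) (i+10))) 0 lines)
  let d5 := pvACond d4 "brage_afterword_start" (pvAScan (fun i l =>
              PySem.Str.strip l == "AFTERWORD" && decide ((i : Int) > d4.getD "brage_start" 0) &&
              pvAAny (fun j => PySem.Str.isIn "BRAGE'S TALK" (PySem.Str.upper (PySem.Str.replace (lines.getD j "") "\u2019" "'"))) (pvWindow n (i+1) (i+3))) 0 lines)
  let d6 := pvACond d5 "notes_start" (pvAScan (fun i l =>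
              PySem.Str.strip l == "NOTES." && decide ((i : Int) > d5.getD "brage_afterword_start" 0)) 0 lines)
  d6.items

-- ===== PORT B =====
-- the nine position lists B's single classification pass records
structure PvIdx where
  forewords : List Nat
  gylfes : List Nat
  chapters : List Nat
  longs : List Nat
  afterwords : List Nat
  foolings : List Nat
  brages : List Nat
  brageRefs : List Nat
  notes : List Nat
deriving Repr

-- the `for i, line in enumerate(lines)` classification loop of B (one pass, nine appends)
def pvBClassify : Nat → List String → PvIdx
  | _, [] => ⟨[], [], [], [], [], [], [], [], []⟩
  | i, l :: ls =>
    let r := pvBClassify (i+1) ls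
    let s := PySem.Str.strip l
    { forewords := if s == "FOREWORD." then i :: r.forewords else r.forewords
      gylfes := if s == "THE FOOLING OF GYLFE." then i :: r.gylfes else r.gylfes
      chapters := if s == "CHAPTER I." then i :: r.chapters else r.chapters
      longs := if 50 < PySem.Str.len s then i :: r.longs else r.longs
      afterwords := if s == "AFTERWORD" then i :: r.afterwords else r.afterwords
      foolings := if PySem.Str.isIn "FOOLING OF GYLFE" l then i :: r.foolings else r.foolings
      brages := if PySem.Str.replace s "\u2019" "'" == "BRAGE'S TALK." then i :: r.brages else r.brages
      brageRefs := if PySem.Str.isIn "BRAGE'S TALK" (PySem.Str.upper (PySem.Str.replace l "\u2019" "'")) then i :: r.brageRefs else r.brageRefs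
      notes := if s == "NOTES." then i :: r.notes else r.notes }

-- B's in_window helper: any(a <= x < b for x in idxs)
def pvBInWindow (idxs : List Nat) (a b : Nat) : Bool := idxs.any (fun x => decide (a ≤ x) && decide (x < b))

-- B's final `for key, idx in …: if idx is not None: sections[key] = idx` loop body
def pvBPut (d : PySem.Dict String Int) (kv : String × Option Nat) : PySem.Dict String Int :=
  match kv.2 with
  | some v => d.insert kv.1 (v : Int)
  | none => d

def find_sections_alt (lines : List String) : List (String × Int) :=
  let r := pvBClassify 0 lines
  let fw := r.forewords.head?
  let gy := r.gylfes.find? (fun g =>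
              r.chapters.any (fun j => decide (g < j) && decide (j < g + 10) && pvBInWindow r.longs (j+1) (j+10)))
  let ga := r.afterwords.find? (fun i =>
              decide (gy.getD 0 < i) && pvBInWindow r.foolings (i+1) (i+3))
  let br := r.brages.find? (fun i =>
              (r.chapters.find? (fun j => decide (i < j) && decide (j < i + 10))).elim false
                (fun j => pvBInWindow r.longs (j+1) (j+10)))
  let ba := r.afterwords.find? (fun i =>
              decide (br.getD 0 < i) && pvBInWindow r.brageRefs (i+1) (i+3))
  let no := r.notes.find? (fun i => decide (ba.getD 0 < i))
  (([("foreword_start", fw), ("gylfe_start", gy), ("gylfe_afterword_start", ga),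
     ("brage_start", br), ("brage_afterword_start", ba), ("notes_start", no)]
    : List (String × Option Nat)).foldl pvBPut PySem.Dict.empty).items

-- ===== PRECONDITION & SPEC =====
def Spec_find_sections (lines : List String) (out : List (String × Int)) : Prop := out = find_sections_alt lines
instance (lines : List String) (out : List (String × Int)) : Decidable (Spec_find_sections lines out) := by unfold Spec_find_sections; infer_instance

-- ===== CLAIM (what is proved, stated in full; the proofs are below) =====
def Claim_equal_find_sections : Prop := ∀ (lines : List String), Dom_find_sections lines → Spec_find_sections lines (find_sections lines)

-- ===== LEMMAS AND PROOFS =====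

theorem any_congr' (xs : List Nat) (p q : Nat → Bool) (h : ∀ x, p x = q x) :
    xs.any p = xs.any q := by
  induction xs with
  | nil => rfl
  | cons x xs ih => simp [List.any_cons, h, ih]

theorem find?_congr' (xs : List Nat) (p q : Nat → Bool) (h : ∀ x, p x = q x) :
    xs.find? p = xs.find? q := by
  induction xs with
  | nil => rfl
  | cons x xs ih => simp only [List.find?_cons, h, ih]

theorem any_filter' (xs : List Nat) (p q : Nat → Bool) :
    (xs.filter p).any q = xs.any (fun x => p x && q x) := by
  induction xs with
  | nil => rfl
  | cons x xs ih => by_cases h : p x <;> simp [h, ih]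

theorem find?_filter' (xs : List Nat) (p q : Nat → Bool) :
    (xs.filter p).find? q = xs.find? (fun x => p x && q x) := by
  induction xs with
  | nil => rfl
  | cons x xs ih =>
    by_cases hp : p x <;> by_cases hq : q x <;> simp [hp, hq, ih]

theorem head?_filter' (xs : List Nat) (p : Nat → Bool) :
    (xs.filter p).head? = xs.find? p := by
  induction xs with
  | nil => rfl
  | cons x xs ih => by_cases h : p x <;> simp [h, ih]

theorem window_eq_filter_range (n a b : Nat) :
    pvWindow n a b = (List.range n).filter (fun x => decide (a ≤ x) && decide (x < b)) := by
  induction n with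
  | zero => simp [pvWindow]
  | succ n ih =>
    rw [List.range_succ, List.filter_append, ← ih]
    by_cases h1 : a ≤ n
    · by_cases h2 : n < b
      · have hm : min b (n+1) - a = (min b n - a) + 1 := by omega
        have hc := List.range'_concat (step := 1) (s := a) (n := min b n - a)
        simp only [pvWindow, hm, hc, one_mul]
        have : a + (min b n - a) = n := by omega
        simp [this, h1, h2]
      · have hm : min b (n+1) - a = min b n - a := by omega
        simp [pvWindow, hm, h1, h2]
    · have hm : min b (n+1) - a = min b n - a := by omega
      simp [pvWindow, hm, h1]

theorem pvBInWindow_filter (n a b : Nat) (p : Nat → Bool) :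
    pvBInWindow ((List.range n).filter p) a b = (pvWindow n a b).any p := by
  rw [pvBInWindow, window_eq_filter_range, any_filter', any_filter']
  refine any_congr' _ _ _ (fun x => ?_)
  cases p x <;> cases hA : decide (a ≤ x) <;> cases hB : decide (x < b) <;> simp

theorem decide_lt_succ_le (a j : Nat) : decide (a < j) = decide (a + 1 ≤ j) := rfl

theorem filter_any_window (n b a : Nat) (p q : Nat → Bool) :
    ((List.range n).filter p).any (fun j => decide (a < j) && decide (j < b) && q j)
      = (pvWindow n (a+1) b).any (fun j => p j && q j) := by
  rw [window_eq_filter_range, any_filter', any_filter']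
  refine any_congr' _ _ _ (fun j => ?_)
  rw [decide_lt_succ_le]
  cases p j <;> cases hA : decide (a + 1 ≤ j) <;> cases hB : decide (j < b) <;> cases q j <;> simp

theorem filter_find?_window (n b a : Nat) (p : Nat → Bool) :
    ((List.range n).filter p).find? (fun j => decide (a < j) && decide (j < b))
      = (pvWindow n (a+1) b).find? p := by
  rw [window_eq_filter_range, find?_filter', find?_filter']
  refine find?_congr' _ _ _ (fun j => ?_)
  rw [decide_lt_succ_le]
  cases p j <;> cases hA : decide (a + 1 ≤ j) <;> cases hB : decide (j < b) <;> simp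

theorem pvAAny_eq_any (p : Nat → Bool) (js : List Nat) : pvAAny p js = js.any p := by
  induction js with
  | nil => rfl
  | cons j js ih => by_cases h : p j <;> simp [pvAAny, h, ih]

theorem pvAGylfeChap_eq_any (lines : List String) (js : List Nat) :
    pvAGylfeChap lines js = js.any (fun j =>
      (PySem.Str.strip (lines.getD j "") == "CHAPTER I.") &&
      (pvWindow lines.length (j+1) (j+10)).any
        (fun k => 50 < PySem.Str.len (PySem.Str.strip (lines.getD k "")))) := by
  induction js with
  | nil => rfl
  | cons j js ih =>
    simp only [pvAGylfeChap, ih, List.any_cons, pvAAny_eq_any]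
    split_ifs with hc hb <;> simp_all

theorem pvABrageChap_eq_elim (lines : List String) (js : List Nat) :
    pvABrageChap lines js =
      (js.find? (fun j => PySem.Str.strip (lines.getD j "") == "CHAPTER I.")).elim false
        (fun j => (pvWindow lines.length (j+1) (j+10)).any
          (fun k => 50 < PySem.Str.len (PySem.Str.strip (lines.getD k "")))) := by
  induction js with
  | nil => rfl
  | cons j js ih =>
    simp only [pvABrageChap, ih, List.find?_cons, pvAAny_eq_any]
    cases h : (PySem.Str.strip (lines.getD j "") == "CHAPTER I.") <;> simp

theorem pvAScan_eq_aux (c : Nat → String → Bool) (lines : List String) (xs : List String)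
    (i : Nat) (h : ∀ k, xs[k]? = lines[i + k]?) :
    pvAScan c i xs = (List.range' i xs.length).find? (fun j => c j (lines.getD j "")) := by
  induction xs generalizing i with
  | nil => rfl
  | cons x xs ih =>
    have h0 : lines.getD i "" = x := by
      have := h 0
      simp at this
      simp [List.getD_eq_getElem?_getD, ← this]
    simp only [pvAScan, List.length_cons, List.range'_succ, List.find?_cons, h0]
    by_cases hc : c i x
    · simp [hc]
    · simp only [hc, Bool.false_eq_true, ite_false]
      exact ih (i + 1) (fun k => by
        rw [show i + 1 + k = i + (k + 1) by omega]
        simpa using h (k + 1))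

theorem pvAScan_eq (c : Nat → String → Bool) (lines : List String) :
    pvAScan c 0 lines = (List.range lines.length).find? (fun j => c j (lines.getD j "")) := by
  rw [List.range_eq_range']
  exact pvAScan_eq_aux c lines lines 0 (fun k => by simp)

theorem pvACollect_eq_aux (lines : List String) (xs : List String) (i : Nat)
    (h : ∀ k, xs[k]? = lines[i + k]?) :
    pvACollect i xs = (List.range' i xs.length).filter
      (fun j => PySem.Str.strip (lines.getD j "") == "THE FOOLING OF GYLFE.") := by
  induction xs generalizing i with
  | nil => rfl
  | cons x xs ih =>
    have h0 : lines.getD i "" = x := by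
      have := h 0
      simp at this
      simp [List.getD_eq_getElem?_getD, ← this]
    have hrec := ih (i + 1) (fun k => by
      rw [show i + 1 + k = i + (k + 1) by omega]
      simpa using h (k + 1))
    simp only [pvACollect, List.length_cons, List.range'_succ, List.filter_cons, h0, hrec]

theorem pvACollect_eq (lines : List String) :
    pvACollect 0 lines = (List.range lines.length).filter
      (fun j => PySem.Str.strip (lines.getD j "") == "THE FOOLING OF GYLFE.") := by
  rw [List.range_eq_range']
  exact pvACollect_eq_aux lines lines 0 (fun k => by simp)

theorem pvAGylfeLoop_eq_find? (lines : List String) (js : List Nat) :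
    pvAGylfeLoop lines js =
      js.find? (fun gs => pvAGylfeChap lines (pvWindow lines.length (gs+1) (gs+10))) := by
  induction js with
  | nil => rfl
  | cons j js ih =>
    simp only [pvAGylfeLoop, List.find?_cons, ih]
    by_cases h : pvAGylfeChap lines (pvWindow lines.length (j+1) (j+10)) <;> simp [h]

theorem pvBClassify_eq_aux (lines : List String) (xs : List String) (i : Nat)
    (h : ∀ k, xs[k]? = lines[i + k]?) :
    pvBClassify i xs = ⟨
      (List.range' i xs.length).filter (fun j => PySem.Str.strip (lines.getD j "") == "FOREWORD."),
      (List.range' i xs.length).filter (fun j => PySem.Str.strip (lines.getD j "") == "THE FOOLING OF GYLFE."),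
      (List.range' i xs.length).filter (fun j => PySem.Str.strip (lines.getD j "") == "CHAPTER I."),
      (List.range' i xs.length).filter (fun j => 50 < PySem.Str.len (PySem.Str.strip (lines.getD j ""))),
      (List.range' i xs.length).filter (fun j => PySem.Str.strip (lines.getD j "") == "AFTERWORD"),
      (List.range' i xs.length).filter (fun j => PySem.Str.isIn "FOOLING OF GYLFE" (lines.getD j "")),
      (List.range' i xs.length).filter (fun j => PySem.Str.replace (PySem.Str.strip (lines.getD j "")) "\u2019" "'" == "BRAGE'S TALK."),
      (List.range' i xs.length).filter (fun j => PySem.Str.isIn "BRAGE'S TALK" (PySem.Str.upper (PySem.Str.replace (lines.getD j "") "\u2019" "'"))),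
      (List.range' i xs.length).filter (fun j => PySem.Str.strip (lines.getD j "") == "NOTES.")⟩ := by
  induction xs generalizing i with
  | nil => rfl
  | cons x xs ih =>
    have h0 : lines.getD i "" = x := by
      have := h 0
      simp at this
      simp [List.getD_eq_getElem?_getD, ← this]
    have hrec := ih (i + 1) (fun k => by
      rw [show i + 1 + k = i + (k + 1) by omega]
      simpa using h (k + 1))
    simp only [pvBClassify, hrec, List.length_cons, List.range'_succ, List.filter_cons, h0,
      decide_eq_true_eq]

theorem pvBClassify_eq (lines : List String) :
    pvBClassify 0 lines = ⟨
      (List.range lines.length).filter (fun j => PySem.Str.strip (lines.getD j "") == "FOREWORD."),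
      (List.range lines.length).filter (fun j => PySem.Str.strip (lines.getD j "") == "THE FOOLING OF GYLFE."),
      (List.range lines.length).filter (fun j => PySem.Str.strip (lines.getD j "") == "CHAPTER I."),
      (List.range lines.length).filter (fun j => 50 < PySem.Str.len (PySem.Str.strip (lines.getD j ""))),
      (List.range lines.length).filter (fun j => PySem.Str.strip (lines.getD j "") == "AFTERWORD"),
      (List.range lines.length).filter (fun j => PySem.Str.isIn "FOOLING OF GYLFE" (lines.getD j "")),
      (List.range lines.length).filter (fun j => PySem.Str.replace (PySem.Str.strip (lines.getD j "")) "\u2019" "'" == "BRAGE'S TALK."),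
      (List.range lines.length).filter (fun j => PySem.Str.isIn "BRAGE'S TALK" (PySem.Str.upper (PySem.Str.replace (lines.getD j "") "\u2019" "'"))),
      (List.range lines.length).filter (fun j => PySem.Str.strip (lines.getD j "") == "NOTES.")⟩ := by
  rw [List.range_eq_range']
  exact pvBClassify_eq_aux lines lines 0 (fun k => by simp)

theorem getD_pvACond_self (d : PySem.Dict String Int) (k : String) (o : Option Nat)
    (h : d.getD k 0 = 0) :
    (pvACond d k o).getD k 0 = ((o.getD 0 : Nat) : Int) := by
  rcases o with _ | v
  · simpa [pvACond] using h
  · simp [pvACond, PySem.Dict.getD_insert_self]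

theorem getD_pvACond_other (d : PySem.Dict String Int) (k k' : String) (o : Option Nat)
    (v : Int) (h : k' ≠ k) :
    (pvACond d k o).getD k' v = d.getD k' v := by
  rcases o <;> simp [pvACond, PySem.Dict.getD_insert_of_ne _ _ _ h]

theorem guard_gy (fw gy : Option Nat) :
    (pvACond (pvACond PySem.Dict.empty "foreword_start" fw) "gylfe_start" gy).getD
      "gylfe_start" 0 = ((gy.getD 0 : Nat) : Int) := by
  apply getD_pvACond_self
  rw [getD_pvACond_other _ _ _ _ _ (by decide)]
  exact PySem.Dict.getD_empty _ _

theorem guard_br (fw gy ga br : Option Nat) :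
    (pvACond (pvACond (pvACond (pvACond PySem.Dict.empty "foreword_start" fw)
      "gylfe_start" gy) "gylfe_afterword_start" ga) "brage_start" br).getD
      "brage_start" 0 = ((br.getD 0 : Nat) : Int) := by
  apply getD_pvACond_self
  rw [getD_pvACond_other _ _ _ _ _ (by decide), getD_pvACond_other _ _ _ _ _ (by decide),
    getD_pvACond_other _ _ _ _ _ (by decide)]
  exact PySem.Dict.getD_empty _ _

theorem guard_ba (fw gy ga br ba : Option Nat) :
    (pvACond (pvACond (pvACond (pvACond (pvACond PySem.Dict.empty "foreword_start" fw)
      "gylfe_start" gy) "gylfe_afterword_start" ga) "brage_start" br)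
      "brage_afterword_start" ba).getD "brage_afterword_start" 0
      = ((ba.getD 0 : Nat) : Int) := by
  apply getD_pvACond_self
  rw [getD_pvACond_other _ _ _ _ _ (by decide), getD_pvACond_other _ _ _ _ _ (by decide),
    getD_pvACond_other _ _ _ _ _ (by decide), getD_pvACond_other _ _ _ _ _ (by decide)]
  exact PySem.Dict.getD_empty _ _

theorem pvAssemble (fw gy ga br ba no : Option Nat) :
    (pvACond (pvACond (pvACond (pvACond (pvACond (pvACond PySem.Dict.empty "foreword_start" fw)
      "gylfe_start" gy) "gylfe_afterword_start" ga) "brage_start" br)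
      "brage_afterword_start" ba) "notes_start" no).items
    = (([("foreword_start", fw), ("gylfe_start", gy), ("gylfe_afterword_start", ga),
        ("brage_start", br), ("brage_afterword_start", ba), ("notes_start", no)]
       : List (String × Option Nat)).foldl pvBPut PySem.Dict.empty).items := by
  rcases fw <;> rcases gy <;> rcases ga <;> rcases br <;> rcases ba <;> rcases no <;> rfl

theorem find_sections_eq (lines : List String) :
    find_sections lines = find_sections_alt lines := by
  unfold find_sections find_sections_alt
  rw [pvBClassify_eq]
  simp only [pvAScan_eq, pvAGylfeLoop_eq_find?, pvACollect_eq, pvAGylfeChap_eq_any,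
    pvABrageChap_eq_elim, pvAAny_eq_any]
  simp only [head?_filter', pvBInWindow_filter, filter_any_window, filter_find?_window]
  simp only [find?_filter']
  simp only [guard_gy, guard_br, guard_ba, gt_iff_lt, Nat.cast_lt, Bool.and_assoc]
  rw [pvAssemble]

-- ===== VERDICT (by name: the statement is the Claim_ definition above) =====
theorem find_sections_spec : Claim_equal_find_sections := by
  intro lines _h
  exact find_sections_eq lines
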